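-- pv_equiv track=rewrite | github.com/kashima1234/labs_py | aaaall labs/KASHIMA LABS/od lab/Lab11 (2).py | word_indexes
-- ===== SOURCE A (Python) =====
-- import string
--
-- lines = ['odko. 22aaa22.', 'Ich bin  3+4+2+2+2    -2, my prince. Genoa and Lucca are no longer just prerogatives, from',
--          ' -3  4 estates, de la famille Buon 9 -     0 aparte. Nein, ich warne Sie davor, wenn Sie mir nicht sagen, dass wir es haben',
--          'Krieg, wenn Sie sich noch erlauben, all die Schande, all die Gräueltaten dieses Antichristen (mein Wort,',
--          'glaube ich) — ich kenne dich nicht mehr, vo2 +   3you are no longer my friend, you',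
--          'nêtes plus мой верный раб, 6    + co0 mme vous dites.',
--          'Ну, здравствуйте, здравствуйте. Ich sehe, dass ich dir Angst mache 2, садитесь и рассказывайте.']
--
-- def word_indexes(word):
--     ln = len(word)
--
--     for i in range(len(lines)):
--         idx = lines[i].find(word)
--         while idx != -1:
--             curr_word = word
--             if idx - 1 < 0: curr_word = ' ' + curr_word
--             else: curr_word = lines[i][idx - 1] + curr_word
--             if idx + ln >= len(lines[i]): curr_word = curr_word + ' '
--             else: curr_word = curr_word + lines[i][idx + ln]
--             if ((curr_word[0] == ' ' or curr_word[0] in string.punctuation)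
--                 and (curr_word[-1] == ' ' or curr_word[-1] in string.punctuation)):
--                 yield i, idx
--             idx = lines[i].find(word, idx + len(word))
-- ===== SOURCE B (Python) =====
-- import string
--
-- lines = ['odko. 22aaa22.', 'Ich bin  3+4+2+2+2    -2, my prince. Genoa and Lucca are no longer just prerogatives, from',
--          ' -3  4 estates, de la famille Buon 9 -     0 aparte. Nein, ich warne Sie davor, wenn Sie mir nicht sagen, dass wir es haben',
--          'Krieg, wenn Sie sich noch erlauben, all die Schande, all die Gräueltaten dieses Antichristen (mein Wort,',
--          'glaube ich) — ich kenne dich nicht mehr, vo2 +   3you are no longer my friend, you',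
--          'nêtes plus мой верный раб, 6    + co0 mme vous dites.',
--          'Ну, здравствуйте, здравствуйте. Ich sehe, dass ich dir Angst mache 2, садитесь и рассказывайте.']
--
-- BOUND = ' ' + string.punctuation
--
-- def word_indexes(word):
--     n = len(word)
--     for i, line in enumerate(lines):
--         m = len(line)
--         j = 0
--         while j + n <= m:
--             if line[j:j+n] == word:
--                 left = line[j-1] if j > 0 else ' '
--                 right = line[j+n] if j + n < m else ' '
--                 if left in BOUND and right in BOUND:
--                     yield i, j
--                 j += n
--             else:
--                 j += 1
-- ===== Notes on version B (the rewrite author's own statement) =====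
-- stated objective: alternative
-- what changed: Replaces A's repeated str.find calls and per-hit boundary-string construction (prev+word+next) with a single left-to-right index scan per line that compares the slice in place and tests the two boundary characters directly against a precomputed space-plus-punctuation class.
import Mathlib
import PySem

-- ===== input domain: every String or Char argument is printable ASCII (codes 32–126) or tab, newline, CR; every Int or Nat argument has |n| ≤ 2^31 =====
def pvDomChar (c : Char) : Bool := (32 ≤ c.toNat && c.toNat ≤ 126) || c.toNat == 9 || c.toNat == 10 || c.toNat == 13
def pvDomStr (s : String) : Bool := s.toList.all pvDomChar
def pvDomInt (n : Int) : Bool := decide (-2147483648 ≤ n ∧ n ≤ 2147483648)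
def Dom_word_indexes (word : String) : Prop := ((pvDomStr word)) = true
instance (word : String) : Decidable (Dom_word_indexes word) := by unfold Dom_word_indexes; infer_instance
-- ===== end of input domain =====

-- B replaces A's repeated str.find + boundary-string construction by a single left-to-right
-- index scan per line that compares the slice in place and tests the two boundary characters
-- directly (objective: alternative; same asymptotic cost).

-- the module-level constant 'lines' (shared context of A and B), as lists of code points
def pvLines : List (List Char) :=
  ["odko. 22aaa22.".toList,
   "Ich bin  3+4+2+2+2    -2, my prince. Genoa and Lucca are no longer just prerogatives, from".toList,
   " -3  4 estates, de la famille Buon 9 -     0 aparte. Nein, ich warne Sie davor, wenn Sie mir nicht sagen, dass wir es haben".toList,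
   "Krieg, wenn Sie sich noch erlauben, all die Schande, all die Gräueltaten dieses Antichristen (mein Wort,".toList,
   "glaube ich) — ich kenne dich nicht mehr, vo2 +   3you are no longer my friend, you".toList,
   "nêtes plus мой верный раб, 6    + co0 mme vous dites.".toList,
   "Ну, здравствуйте, здравствуйте. Ich sehe, dass ich dir Angst mache 2, садитесь и рассказывайте.".toList]

-- string.punctuation (ASCII); 'c in string.punctuation' for a single character is membership
def pvPunct : List Char := "!\"#$%&'()*+,-./:;<=>?@[\\]^_`{|}~".toList

-- ===== PORT A =====
-- A's inner while loop; fuel (cs.length + 1) only makes the recursion total: each Python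
-- iteration advances idx by len(word) ≥ 1 (word ≠ '' is Pre_), so fuel never runs out.
def pvLoopA (i : Int) (cs w : List Char) (fuel : Nat) (idx : Int) : List (Int × Int) :=
  match fuel with
  | 0 => []
  | fuel + 1 =>
    if idx = -1 then []
    else
      let ln : Int := w.length
      let c0 : Char := if idx - 1 < 0 then ' ' else PySem.List.pyGetD cs (idx - 1) ' '
      let c1 : Char := if idx + ln ≥ (cs.length : Int) then ' ' else PySem.List.pyGetD cs (idx + ln) ' '
      let currWord : List Char := c0 :: (w ++ [c1])
      let rest := pvLoopA i cs w fuel (PySem.Chars.findFrom cs w (idx + ln) none)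
      if (PySem.List.pyGetD currWord 0 ' ' = ' ' ∨ pvPunct.contains (PySem.List.pyGetD currWord 0 ' '))
         ∧ (PySem.List.pyGetD currWord (-1) ' ' = ' ' ∨ pvPunct.contains (PySem.List.pyGetD currWord (-1) ' '))
      then (i, idx) :: rest else rest

def word_indexes (word : String) : List (Int × Int) :=
  let w := word.toList
  (List.range pvLines.length).foldl
    (fun acc i =>
      let cs := pvLines.getD i []
      acc ++ pvLoopA (i : Int) cs w (cs.length + 1) (PySem.Chars.find cs w)) []

-- ===== PORT B =====
def pvBound : List Char := ' ' :: pvPunct  -- BOUND: space followed by string.punctuation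

-- B's while loop; fuel (cs.length + 1) only makes it total: j advances by ≥ 1 each step.
def pvScanB (i : Int) (cs w : List Char) (fuel j : Nat) : List (Int × Int) :=
  match fuel with
  | 0 => []
  | fuel + 1 =>
    if j + w.length ≤ cs.length then
      if (cs.drop j).take w.length = w then
        let left : Char := if 0 < j then cs.getD (j - 1) ' ' else ' '
        let right : Char := if j + w.length < cs.length then cs.getD (j + w.length) ' ' else ' '
        if pvBound.contains left ∧ pvBound.contains right then
          (i, (j : Int)) :: pvScanB i cs w fuel (j + w.length)
        else pvScanB i cs w fuel (j + w.length)
      else pvScanB i cs w fuel (j + 1)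
    else []

def word_indexes_alt (word : String) : List (Int × Int) :=
  let w := word.toList
  (PySem.List.enumerate pvLines).flatMap (fun p => pvScanB p.1 p.2 w (p.2.length + 1) 0)

-- ===== PRECONDITION & SPEC =====
-- Pre_ excludes only the empty word, on which A's while loop never terminates (find('' , idx) = idx forever).
def Pre_word_indexes (word : String) : Prop := word ≠ ""
instance (word : String) : Decidable (Pre_word_indexes word) := by unfold Pre_word_indexes; infer_instance
def pvWitness_word_indexes : String := "Sie"

def Spec_word_indexes (word : String) (out : List (Int × Int)) : Prop := out = word_indexes_alt word
instance (word : String) (out : List (Int × Int)) : Decidable (Spec_word_indexes word out) := by unfold Spec_word_indexes; infer_instance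

-- ===== CLAIM (what is proved, stated in full; the proofs are below) =====
def Claim_equal_word_indexes : Prop := ∀ (word : String), Dom_word_indexes word → Pre_word_indexes word → Spec_word_indexes word (word_indexes word)

-- ===== LEMMAS AND PROOFS =====

-- a word w is found at position 0 of s exactly when it is a prefix
lemma pv_find_eq_zero_of_prefix (s w : List Char) (h : w <+: s) : PySem.Chars.find s w = 0 := by
  have h0 : 0 ≤ PySem.Chars.find s w := (PySem.Chars.find_nonneg_iff s w).2 h.isInfix
  obtain ⟨_, hmin⟩ := PySem.Chars.find_spec h0
  by_contra hne
  have hpos : 0 < (PySem.Chars.find s w).toNat := by omega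
  exact hmin 0 hpos (by simpa using h)

-- str.find on a cons cell when the word is not a prefix
lemma pv_find_cons (c : Char) (t w : List Char) (h : ¬ w <+: c :: t) :
    PySem.Chars.find (c :: t) w =
      if PySem.Chars.find t w = -1 then -1 else 1 + PySem.Chars.find t w := by
  by_cases ht : PySem.Chars.find t w = -1
  · rw [if_pos ht, PySem.Chars.find_eq_neg_one_iff]
    rw [PySem.Chars.find_eq_neg_one_iff] at ht
    intro hinf
    rcases List.infix_cons_iff.1 hinf with hp | hi
    · exact h hp
    · exact ht hi
  · rw [if_neg ht]
    have htn : 0 ≤ PySem.Chars.find t w := by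
      have := PySem.Chars.neg_one_le_find t w
      omega
    obtain ⟨hp, hmin⟩ := PySem.Chars.find_spec htn
    have hinfs : w <:+: c :: t := by
      have : w <:+: t := (PySem.Chars.find_nonneg_iff t w).1 htn
      exact (List.infix_cons_iff).2 (Or.inr this)
    have hsn : 0 ≤ PySem.Chars.find (c :: t) w := (PySem.Chars.find_nonneg_iff _ w).2 hinfs
    obtain ⟨hq, hqmin⟩ := PySem.Chars.find_spec hsn
    set q := (PySem.Chars.find (c :: t) w).toNat with hqdef
    set p := (PySem.Chars.find t w).toNat with hpdef
    have hq0 : q ≠ 0 := by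
      intro h0
      rw [h0] at hq
      exact h (by simpa using hq)
    have hq1 : (c :: t).drop q = t.drop (q - 1) := by
      obtain ⟨m, hm⟩ : ∃ m, q = m + 1 := ⟨q - 1, by omega⟩
      rw [hm]
      simp
    have hple : p ≤ q - 1 := by
      by_contra hlt
      exact hmin (q - 1) (by omega) (hq1 ▸ hq)
    have hqle : q ≤ p + 1 := by
      by_contra hlt
      exact hqmin (p + 1) (by omega) (by simpa using hp)
    have : q = p + 1 := by omega
    omega

-- advancing the search start past a position that carries no occurrence
lemma pv_findFrom_succ (cs w : List Char) (j : Nat) (hj : j < cs.length)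
    (h : ¬ w <+: cs.drop j) :
    PySem.Chars.findFrom cs w (j : Int) = PySem.Chars.findFrom cs w ((j + 1 : Nat) : Int) := by
  rw [PySem.Chars.findFrom_natCast cs w j (by omega),
      PySem.Chars.findFrom_natCast cs w (j + 1) (by omega)]
  have hdrop : cs.drop j = cs[j] :: cs.drop (j + 1) := List.drop_eq_getElem_cons hj
  rw [hdrop] at h
  rw [hdrop, pv_find_cons _ _ _ h]
  by_cases h1 : PySem.Chars.find (cs.drop (j + 1)) w = -1
  · simp [h1]
  · have h2 : 0 ≤ PySem.Chars.find (cs.drop (j + 1)) w := by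
      have := PySem.Chars.neg_one_le_find (cs.drop (j + 1)) w
      omega
    rw [if_neg h1, if_neg (by omega), if_neg h1]
    push_cast
    ring

-- the search start is itself an occurrence
lemma pv_findFrom_self (cs w : List Char) (j : Nat) (hj : j ≤ cs.length)
    (h : w <+: cs.drop j) :
    PySem.Chars.findFrom cs w (j : Int) = (j : Int) := by
  rw [PySem.Chars.findFrom_natCast cs w j hj, pv_find_eq_zero_of_prefix _ _ h]
  simp

-- past the last feasible start there is no occurrence at all
lemma pv_findFrom_none (cs w : List Char) (j : Nat) (hj : j ≤ cs.length)
    (hlen : cs.length < j + w.length) :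
    PySem.Chars.findFrom cs w (j : Int) = -1 := by
  rw [PySem.Chars.findFrom_natCast cs w j hj]
  have : PySem.Chars.find (cs.drop j) w = -1 := by
    rw [PySem.Chars.find_eq_neg_one_iff]
    intro hinf
    have := hinf.length_le
    simp only [List.length_drop] at this
    omega
  simp [this]

-- curr_word[0] and curr_word[-1] of A's constructed boundary string
lemma pv_head (c0 c1 : Char) (w : List Char) :
    PySem.List.pyGetD (c0 :: (w ++ [c1])) 0 ' ' = c0 := by
  simp [pysem]

lemma pv_last (c0 c1 : Char) (w : List Char) :
    PySem.List.pyGetD (c0 :: (w ++ [c1])) (-1) ' ' = c1 := by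
  simp [PySem.List.pyGetD, PySem.List.pyGet?, PySem.List.pyIdx?]

-- membership in BOUND (space plus punctuation), as A tests it
lemma pv_bound (c : Char) :
    pvBound.contains c = true ↔ (c = ' ' ∨ pvPunct.contains c = true) := by
  simp [pvBound]

-- key per-line lemma: B's scan from j equals A's loop started at the first occurrence ≥ j
lemma pv_key (i : Int) (cs w : List Char) (hw : w ≠ []) :
    ∀ fB fA j, j ≤ cs.length → cs.length + 1 - j ≤ fB → cs.length + 1 - j ≤ fA →
      pvScanB i cs w fB j = pvLoopA i cs w fA (PySem.Chars.findFrom cs w (j : Int) none) := by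
  have hn : 0 < w.length := List.length_pos_of_ne_nil hw
  intro fB
  induction fB with
  | zero => intro fA j hj hB hA; omega
  | succ fB ih =>
    intro fA j hj hB hA
    obtain ⟨fA', rfl⟩ : ∃ k, fA = k + 1 := ⟨fA - 1, by omega⟩
    by_cases hle : j + w.length ≤ cs.length
    · by_cases hm : (cs.drop j).take w.length = w
      · -- occurrence at j: both A and B treat position j and continue at j + len(word)
        have hpre : w <+: cs.drop j := by
          rw [List.prefix_iff_eq_take]
          exact hm.symm
        rw [pv_findFrom_self cs w j hj hpre]
        have hc0 : (if (j : Int) - 1 < 0 then ' ' else PySem.List.pyGetD cs ((j : Int) - 1) ' ')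
            = (if 0 < j then cs.getD (j - 1) ' ' else ' ') := by
          rcases Nat.eq_zero_or_pos j with h0 | h0
          · subst h0; norm_num
          · rw [if_neg (by omega), if_pos h0]
            have hcast : (j : Int) - 1 = ((j - 1 : Nat) : Int) := by omega
            rw [hcast, PySem.List.pyGetD_natCast]
        have hc1 : (if (j : Int) + (w.length : Int) ≥ (cs.length : Int) then ' '
              else PySem.List.pyGetD cs ((j : Int) + (w.length : Int)) ' ')
            = (if j + w.length < cs.length then cs.getD (j + w.length) ' ' else ' ') := by
          by_cases hlt : j + w.length < cs.length
          · rw [if_neg (by omega), if_pos hlt]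
            have hcast : (j : Int) + (w.length : Int) = ((j + w.length : Nat) : Int) := by
              push_cast; ring
            rw [hcast, PySem.List.pyGetD_natCast]
          · rw [if_pos (by omega), if_neg hlt]
        have hcast : (j : Int) + (w.length : Int) = ((j + w.length : Nat) : Int) := by
          push_cast; ring
        have hrec := ih fA' (j + w.length) (by omega) (by omega) (by omega)
        simp only [pvScanB, pvLoopA]
        rw [if_pos hle, if_pos hm, if_neg (show ¬((j : Int) = -1) by omega)]
        rw [pv_head, pv_last, hc0, hc1, hcast, hrec]
        have hL := pv_bound (if 0 < j then cs.getD (j - 1) ' ' else ' ')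
        have hR := pv_bound (if j + w.length < cs.length then cs.getD (j + w.length) ' ' else ' ')
        simp only [hL, hR]
      · -- no occurrence at j: B steps to j + 1, A's find skips j as well
        have hpre : ¬ w <+: cs.drop j := by
          rw [List.prefix_iff_eq_take]
          intro hc
          exact hm hc.symm
        rw [pv_findFrom_succ cs w j (by omega) hpre]
        simp only [pvScanB]
        rw [if_pos hle, if_neg hm]
        exact ih (fA' + 1) (j + 1) (by omega) (by omega) (by omega)
    · -- no room for a match: both stop
      rw [pv_findFrom_none cs w j hj (by omega)]
      simp [pvScanB, pvLoopA, hle]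

lemma pv_perline (i : Int) (cs w : List Char) (hw : w ≠ []) :
    pvScanB i cs w (cs.length + 1) 0 = pvLoopA i cs w (cs.length + 1) (PySem.Chars.find cs w) := by
  have := pv_key i cs w hw (cs.length + 1) (cs.length + 1) 0 (Nat.zero_le _) (by omega) (by omega)
  simpa using this

-- ===== VERDICT (by name: the statement is the Claim_ definition above) =====
theorem word_indexes_spec : Claim_equal_word_indexes := by
  intro word _ hpre
  unfold Spec_word_indexes word_indexes word_indexes_alt
  have hw : word.toList ≠ [] := by
    simpa [String.toList_eq_nil_iff] using hpre
  simp only [pvLines, PySem.List.enumerate, List.length_cons, List.length_nil, List.range_succ,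
    List.range_zero, List.foldl_append, List.foldl_cons, List.foldl_nil, List.flatMap_cons,
    List.flatMap_nil, List.getD, List.getElem?_cons_zero, List.getElem?_cons_succ,
    Option.getD_some, List.nil_append, List.append_nil]
  rw [← pv_perline _ _ _ hw, ← pv_perline _ _ _ hw, ← pv_perline _ _ _ hw,
      ← pv_perline _ _ _ hw, ← pv_perline _ _ _ hw, ← pv_perline _ _ _ hw,
      ← pv_perline _ _ _ hw]
  simp [List.append_assoc]
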